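-- pv_equiv track=rewrite | github.com/amougino/magnum | magnum/oper/basic_func.py | short_mul
-- ===== SOURCE A (Python) =====
-- def short_mul(val, digit):
--     length = len(val)
--     for i in range(length):
--         val[i] *= digit
--     for i in range(1, length):
--         idx = length - i
--         val[idx - 1] += val[idx] // 10
--         val[idx] %= 10
--     while val[0] // 10 != 0:
--         val.insert(0, val[0] // 10)
--         val[1] %= 10
--     return val
-- ===== SOURCE B (Python) =====
-- def short_mul(val, digit):
--     # Whole-number arithmetic instead of per-digit passes: convert the digit
--     # array to one integer, multiply once, and re-extract the digits.
--     # Mutates val in place (val[:] = ...) and returns it, like the original.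
--     n = len(val)
--     m = 0
--     for d in val:
--         m = m * 10 + d
--     m *= digit
--     tail = []
--     for _ in range(n - 1):
--         tail.append(m % 10)
--         m //= 10
--     out = [m % 10]
--     m //= 10
--     while m != 0:
--         out.append(m % 10)
--         m //= 10
--     out.reverse()
--     tail.reverse()
--     val[:] = out + tail
--     return val
-- ===== Notes on version B (the rewrite author's own statement) =====
-- stated objective: alternative
-- what changed: Replaces A's per-digit multiply pass plus index-juggling carry-propagation pass with whole-number arithmetic: fold the digit array into one integer, multiply once, and re-extract the digits by repeated divmod.
import Mathlib
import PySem

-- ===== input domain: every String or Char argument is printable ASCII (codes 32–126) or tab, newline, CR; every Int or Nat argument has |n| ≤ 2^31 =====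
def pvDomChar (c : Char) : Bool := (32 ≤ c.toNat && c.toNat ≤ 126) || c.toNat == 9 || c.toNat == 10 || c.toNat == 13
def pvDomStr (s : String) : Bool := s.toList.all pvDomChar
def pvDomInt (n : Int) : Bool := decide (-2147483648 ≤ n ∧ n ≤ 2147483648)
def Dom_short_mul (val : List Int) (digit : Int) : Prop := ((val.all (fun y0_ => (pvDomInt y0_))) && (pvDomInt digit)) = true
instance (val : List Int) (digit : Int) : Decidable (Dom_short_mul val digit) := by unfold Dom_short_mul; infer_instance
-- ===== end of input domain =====

-- B replaces A's two per-digit passes by whole-number arithmetic (fold to one integer,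
-- multiply once, re-extract digits); both A and B mutate val in place and return it,
-- the equivalence proved here is about the returned value.

-- ===== PORT A =====
-- one iteration of A's carry loop: val[idx-1] += val[idx] // 10; val[idx] %= 10
def stepA (v : List Int) (idx : Nat) : List Int :=
  let v1 := v.set (idx - 1) (v.getD (idx - 1) 0 + PySem.Int.floordiv (v.getD idx 0) 10)
  v1.set idx (PySem.Int.mod (v1.getD idx 0) 10)

-- A's final loop: while val[0] // 10 != 0: val.insert(0, val[0] // 10); val[1] %= 10
-- fuel-bounded; fuel val[0].natAbs + 1 suffices whenever the Python loop terminates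
-- (Pre_short_mul excludes the inputs on which it diverges)
def shortMulFront : Nat → List Int → List Int
  | 0, v => v
  | fuel + 1, v =>
    if PySem.Int.floordiv (v.getD 0 0) 10 ≠ 0 then
      let v1 := PySem.Int.floordiv (v.getD 0 0) 10 :: v
      shortMulFront fuel (v1.set 1 (PySem.Int.mod (v1.getD 1 0) 10))
    else v

def short_mul (val : List Int) (digit : Int) : List Int :=
  let length := val.length
  let val := val.map (fun x => x * digit)            -- for i in range(length): val[i] *= digit
  let val := (List.range' 1 (length - 1)).foldl      -- for i in range(1, length): idx = length - i; …
    (fun v i => stepA v (length - i)) val            --   (all indices are ≥ 0, so the Nat range is exact)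
  shortMulFront ((val.getD 0 0).natAbs + 1) val

-- ===== PORT B =====
-- Source B's 'while m != 0: out.append(m % 10); m //= 10' (fuel-bounded; m.natAbs + 1 suffices for m ≥ 0)
def shortMulDigits : Nat → Int → List Int → List Int
  | 0, _, out => out
  | fuel + 1, m, out =>
    if m ≠ 0 then shortMulDigits fuel (PySem.Int.floordiv m 10) (out ++ [PySem.Int.mod m 10])
    else out

def short_mul_alt (val : List Int) (digit : Int) : List Int :=
  let n := val.length
  let m := val.foldl (fun a d => a * 10 + d) 0       -- for d in val: m = m * 10 + d
  let m := m * digit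
  let p := (List.range (n - 1)).foldl                -- for _ in range(n - 1): tail.append(m % 10); m //= 10
    (fun (p : Int × List Int) _ => (PySem.Int.floordiv p.1 10, p.2 ++ [PySem.Int.mod p.1 10])) (m, [])
  let out := [PySem.Int.mod p.1 10]
  let m2 := PySem.Int.floordiv p.1 10
  let out := shortMulDigits (m2.natAbs + 1) m2 out
  out.reverse ++ p.2.reverse                         -- out.reverse(); tail.reverse(); val[:] = out + tail

-- ===== PRECONDITION & SPEC =====
-- Pre_ excludes exactly the inputs on which Python A does not return: the empty list
-- (IndexError at val[0]) and inputs whose base-10 value times digit is negative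
-- (A's final while-loop never terminates there: val[0] // 10 gets stuck at -1).
def Pre_short_mul (val : List Int) (digit : Int) : Prop :=
  val ≠ [] ∧ 0 ≤ (val.foldl (fun a d => a * 10 + d) 0) * digit
instance (val : List Int) (digit : Int) : Decidable (Pre_short_mul val digit) := by
  unfold Pre_short_mul; infer_instance
def pvWitness_short_mul : List Int × Int := ([1, 2], 3)

def Spec_short_mul (val : List Int) (digit : Int) (out : List Int) : Prop := out = short_mul_alt val digit
instance (val : List Int) (digit : Int) (out : List Int) : Decidable (Spec_short_mul val digit out) := by
  unfold Spec_short_mul; infer_instance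

-- ===== CLAIM (what is proved, stated in full; the proofs are below) =====
def Claim_equal_short_mul : Prop := ∀ (val : List Int) (digit : Int), Dom_short_mul val digit → Pre_short_mul val digit → Spec_short_mul val digit (short_mul val digit)

-- ===== LEMMAS AND PROOFS =====

-- least-significant-first list of the k lowest digits of m (floor div/mod)
def lowD : Nat → Int → List Int
  | 0, _ => []
  | k + 1, m => PySem.Int.mod m 10 :: lowD k (PySem.Int.floordiv m 10)

-- m floor-divided by 10, k times
def hdiv10 : Nat → Int → Int
  | 0, m => m
  | k + 1, m => hdiv10 k (PySem.Int.floordiv m 10)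

-- A's carry-propagation pass with a carry entering at the right end
def carryPropC : List Int → Int → Int × List Int
  | [], c => (c, [])
  | x :: xs, c =>
    let p := carryPropC xs c
    (PySem.Int.floordiv (x + p.1) 10, PySem.Int.mod (x + p.1) 10 :: p.2)

-- least-significant-first decimal digits of a Nat (empty for 0)
def dtail (m : Nat) : List Int :=
  if h : m = 0 then [] else ((m % 10 : Nat) : Int) :: dtail (m / 10)
termination_by m
decreasing_by exact Nat.div_lt_self (Nat.pos_of_ne_zero h) (by norm_num)

-- least-significant-first decimal digits, at least one digit
def dfull (h : Nat) : List Int := ((h % 10 : Nat) : Int) :: dtail (h / 10)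

theorem fdiv_mul_add (a b : Int) : PySem.Int.floordiv (a * 10 + b) 10 = a + PySem.Int.floordiv b 10 := by
  rw [PySem.Int.floordiv_eq_ediv_of_pos (by norm_num), PySem.Int.floordiv_eq_ediv_of_pos (by norm_num)]; omega

theorem mod_mul_add (a b : Int) : PySem.Int.mod (a * 10 + b) 10 = PySem.Int.mod b 10 := by
  rw [PySem.Int.mod_eq_emod_of_pos (by norm_num), PySem.Int.mod_eq_emod_of_pos (by norm_num)]; omega

theorem mod_toNat (h : Int) (hh : 0 ≤ h) : PySem.Int.mod h 10 = ((h.toNat % 10 : Nat) : Int) := by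
  rw [PySem.Int.mod_eq_emod_of_pos (by norm_num)]; omega

theorem fdiv_toNat (h : Int) (hh : 0 ≤ h) : (PySem.Int.floordiv h 10).toNat = h.toNat / 10 := by
  rw [PySem.Int.floordiv_eq_ediv_of_pos (by norm_num)]; omega

theorem fdiv_nonneg10 (h : Int) (hh : 0 ≤ h) : 0 ≤ PySem.Int.floordiv h 10 := by
  rw [PySem.Int.floordiv_eq_ediv_of_pos (by norm_num)]; omega

theorem fdiv_toNat_lt (h : Int) (hh : 0 ≤ h) (hne : PySem.Int.floordiv h 10 ≠ 0) :
    (PySem.Int.floordiv h 10).toNat < h.toNat := by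
  rw [PySem.Int.floordiv_eq_ediv_of_pos (by norm_num)] at *; omega

theorem fdiv_toNat_lt' (m : Int) (hh : 0 ≤ m) (hne : m ≠ 0) :
    (PySem.Int.floordiv m 10).toNat < m.toNat := by
  rw [PySem.Int.floordiv_eq_ediv_of_pos (by norm_num)]; omega

theorem hdiv10_nonneg : ∀ (k : Nat) (m : Int), 0 ≤ m → 0 ≤ hdiv10 k m := by
  intro k
  induction k with
  | zero => intro m hm; simpa [hdiv10] using hm
  | succ k ih => intro m hm; exact ih _ (fdiv_nonneg10 m hm)

theorem hdiv10_succ_out : ∀ (k : Nat) (m : Int), hdiv10 (k + 1) m = PySem.Int.floordiv (hdiv10 k m) 10 := by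
  intro k
  induction k with
  | zero => intro m; simp [hdiv10]
  | succ k ih => intro m; rw [show hdiv10 (k + 2) m = hdiv10 (k + 1) (PySem.Int.floordiv m 10) from rfl, ih]; rfl

theorem lowD_succ_out : ∀ (k : Nat) (m : Int), lowD (k + 1) m = lowD k m ++ [PySem.Int.mod (hdiv10 k m) 10] := by
  intro k
  induction k with
  | zero => intro m; simp [lowD, hdiv10]
  | succ k ih =>
    intro m
    rw [show lowD (k + 2) m = PySem.Int.mod m 10 :: lowD (k + 1) (PySem.Int.floordiv m 10) from rfl, ih]
    rfl

theorem dtail_ne (q : Nat) (hq : q ≠ 0) : dtail q = ((q % 10 : Nat) : Int) :: dtail (q / 10) := by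
  rw [dtail]; simp [hq]

theorem dtail_zero : dtail 0 = [] := by rw [dtail]; simp

theorem stepA_cons (w0 : Int) (t : List Int) (j : Nat) (hj : 1 ≤ j) :
    stepA (w0 :: t) (1 + j) = w0 :: stepA t j := by
  obtain ⟨jj, rfl⟩ : ∃ jj, j = jj + 1 := ⟨j - 1, by omega⟩
  have h1 : 1 + (jj + 1) = jj + 1 + 1 := by omega
  rw [h1]
  simp [stepA]

theorem foldl_shift (w0 : Int) : ∀ (L : List Nat) (t : List Int), (∀ j ∈ L, 1 ≤ j) →
    L.foldl (fun v j => stepA v (1 + j)) (w0 :: t) = w0 :: L.foldl stepA t := by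
  intro L
  induction L with
  | nil => intro t _; simp
  | cons j L ih =>
    intro t hL
    simp only [List.foldl_cons]
    rw [stepA_cons _ _ _ (hL j (by simp))]
    exact ih _ (fun x hx => hL x (by simp [hx]))

theorem mem_range'_one_le {m k : Nat} (hm : m ∈ List.range' 1 k) : 1 ≤ m := by
  obtain ⟨i, _, rfl⟩ := List.mem_range'.mp hm; omega

theorem loopA_char : ∀ (k : Nat) (w0 : Int) (t : List Int), t.length = k →
    ((List.range' 1 k).reverse).foldl stepA (w0 :: t)
      = (w0 + (carryPropC t 0).1) :: (carryPropC t 0).2 := by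
  intro k
  induction k with
  | zero =>
    intro w0 t ht
    obtain rfl : t = [] := List.length_eq_zero_iff.mp ht
    simp [carryPropC]
  | succ k ih =>
    intro w0 t ht
    obtain ⟨x, rest, rfl⟩ : ∃ x rest, t = x :: rest := by
      cases t with
      | nil => simp at ht
      | cons x rest => exact ⟨x, rest, rfl⟩
    have hr : rest.length = k := by simpa using ht
    rw [List.range'_succ, List.reverse_cons, List.foldl_append]
    have h2 : List.range' (1 + 1) k = (List.range' 1 k).map (fun j => 1 + j) := by
      have := List.map_add_range' (a := 1) (s := 1) (n := k) (step := 1)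
      simpa using this.symm
    rw [h2, ← List.map_reverse, List.foldl_map]
    rw [foldl_shift w0 _ _ (fun j hj => mem_range'_one_le (List.mem_reverse.mp hj))]
    rw [ih x rest hr]
    simp [stepA, carryPropC]

theorem frontLoop_char : ∀ (fuel : Nat) (h : Int) (rest : List Int), 0 ≤ h → h.toNat < fuel →
    shortMulFront fuel (h :: rest) = (dfull h.toNat).reverse ++ rest := by
  intro fuel
  induction fuel with
  | zero => intro h rest _ hf; omega
  | succ fuel ih =>
    intro h rest h0 hf
    simp only [shortMulFront, List.getD_cons_zero]
    by_cases hc : PySem.Int.floordiv h 10 = 0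
    · simp only [hc, ne_eq, not_true_eq_false, if_false]
      have h10 : h.toNat % 10 = h.toNat ∧ h.toNat / 10 = 0 := by
        rw [PySem.Int.floordiv_eq_ediv_of_pos (by norm_num)] at hc; omega
      have : ((h.toNat : Int)) = h := Int.toNat_of_nonneg h0
      simp [dfull, h10.1, h10.2, dtail_zero, this]
    · simp only [hc, ne_eq, not_false_eq_true, if_true]
      have hstep : ((PySem.Int.floordiv h 10 :: h :: rest).set 1
          (PySem.Int.mod ((PySem.Int.floordiv h 10 :: h :: rest).getD 1 0) 10))
          = PySem.Int.floordiv h 10 :: PySem.Int.mod h 10 :: rest := by simp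
      rw [hstep, ih _ _ (fdiv_nonneg10 h h0) (by have := fdiv_toNat_lt h h0 hc; omega)]
      have hq : h.toNat / 10 ≠ 0 := by
        rw [PySem.Int.floordiv_eq_ediv_of_pos (by norm_num)] at hc; omega
      have hfull : dfull h.toNat = PySem.Int.mod h 10 :: dfull ((PySem.Int.floordiv h 10).toNat) := by
        rw [dfull, fdiv_toNat h h0, dfull, ← dtail_ne _ hq, mod_toNat h h0]
      rw [hfull]
      simp

theorem digitsLoop_char : ∀ (fuel : Nat) (m : Int) (out : List Int), 0 ≤ m → m.toNat < fuel →
    shortMulDigits fuel m out = out ++ dtail m.toNat := by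
  intro fuel
  induction fuel with
  | zero => intro m out _ hf; omega
  | succ fuel ih =>
    intro m out h0 hf
    simp only [shortMulDigits]
    by_cases hc : m = 0
    · simp [hc, dtail_zero]
    · simp only [hc, ne_eq, not_false_eq_true, if_true]
      rw [ih _ _ (fdiv_nonneg10 m h0) (by have := fdiv_toNat_lt' m h0 hc; omega)]
      have hq : m.toNat ≠ 0 := by omega
      rw [dtail_ne _ hq, ← mod_toNat m h0, fdiv_toNat m h0]
      simp

theorem tailLoop_char : ∀ (k : Nat) (m : Int) (acc : List Int),
    (List.range k).foldl
      (fun (p : Int × List Int) _ => (PySem.Int.floordiv p.1 10, p.2 ++ [PySem.Int.mod p.1 10])) (m, acc)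
      = (hdiv10 k m, acc ++ lowD k m) := by
  intro k m acc
  induction k with
  | zero => simp [hdiv10, lowD]
  | succ k ih =>
    rw [List.range_succ, List.foldl_append, ih]
    simp [hdiv10_succ_out, lowD_succ_out]

theorem carryPropC_append : ∀ (u : List Int) (x c : Int),
    carryPropC (u ++ [x]) c
      = ((carryPropC u (PySem.Int.floordiv (x + c) 10)).1,
         (carryPropC u (PySem.Int.floordiv (x + c) 10)).2 ++ [PySem.Int.mod (x + c) 10]) := by
  intro u x c
  induction u with
  | nil => simp [carryPropC]
  | cons y u ih => simp [carryPropC, ih]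

theorem carryPropC_spec : ∀ (t : List Int) (c : Int),
    carryPropC t c
      = (hdiv10 t.length (t.foldl (fun a d => a * 10 + d) 0 + c),
         (lowD t.length (t.foldl (fun a d => a * 10 + d) 0 + c)).reverse) := by
  intro t
  induction t using List.reverseRecOn with
  | nil => intro c; simp [carryPropC, hdiv10, lowD]
  | append_singleton u x ih =>
    intro c
    rw [carryPropC_append, ih]
    simp only [List.foldl_append, List.foldl_cons, List.foldl_nil, List.length_append,
      List.length_cons, List.length_nil, Nat.zero_add]
    have e : u.foldl (fun a d => a * 10 + d) 0 * 10 + x + c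
        = u.foldl (fun a d => a * 10 + d) 0 * 10 + (x + c) := by ring
    rw [e]
    rw [show hdiv10 (u.length + 1) (u.foldl (fun a d => a * 10 + d) 0 * 10 + (x + c))
        = hdiv10 u.length (PySem.Int.floordiv (u.foldl (fun a d => a * 10 + d) 0 * 10 + (x + c)) 10) from rfl]
    rw [show lowD (u.length + 1) (u.foldl (fun a d => a * 10 + d) 0 * 10 + (x + c))
        = PySem.Int.mod (u.foldl (fun a d => a * 10 + d) 0 * 10 + (x + c)) 10
          :: lowD u.length (PySem.Int.floordiv (u.foldl (fun a d => a * 10 + d) 0 * 10 + (x + c)) 10) from rfl]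
    rw [fdiv_mul_add, mod_mul_add]
    simp

theorem hdiv10_foldl : ∀ (t : List Int) (a c : Int),
    hdiv10 t.length (t.foldl (fun a d => a * 10 + d) a + c)
      = a + hdiv10 t.length (t.foldl (fun a d => a * 10 + d) 0 + c) := by
  intro t
  induction t using List.reverseRecOn with
  | nil => intro a c; simp [hdiv10]
  | append_singleton u x ih =>
    intro a c
    simp only [List.foldl_append, List.foldl_cons, List.foldl_nil, List.length_append,
      List.length_cons, List.length_nil, Nat.zero_add]
    have e1 : u.foldl (fun a d => a * 10 + d) a * 10 + x + c
        = u.foldl (fun a d => a * 10 + d) a * 10 + (x + c) := by ring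
    have e2 : u.foldl (fun a d => a * 10 + d) 0 * 10 + x + c
        = u.foldl (fun a d => a * 10 + d) 0 * 10 + (x + c) := by ring
    rw [e1, e2]
    rw [show ∀ m, hdiv10 (u.length + 1) m = hdiv10 u.length (PySem.Int.floordiv m 10) from fun _ => rfl]
    rw [show ∀ m, hdiv10 (u.length + 1) m = hdiv10 u.length (PySem.Int.floordiv m 10) from fun _ => rfl]
    rw [fdiv_mul_add, fdiv_mul_add]
    exact ih a (PySem.Int.floordiv (x + c) 10)

theorem lowD_foldl : ∀ (t : List Int) (a c : Int),
    lowD t.length (t.foldl (fun a d => a * 10 + d) a + c)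
      = lowD t.length (t.foldl (fun a d => a * 10 + d) 0 + c) := by
  intro t
  induction t using List.reverseRecOn with
  | nil => intro a c; simp [lowD]
  | append_singleton u x ih =>
    intro a c
    simp only [List.foldl_append, List.foldl_cons, List.foldl_nil, List.length_append,
      List.length_cons, List.length_nil, Nat.zero_add]
    have e1 : u.foldl (fun a d => a * 10 + d) a * 10 + x + c
        = u.foldl (fun a d => a * 10 + d) a * 10 + (x + c) := by ring
    have e2 : u.foldl (fun a d => a * 10 + d) 0 * 10 + x + c
        = u.foldl (fun a d => a * 10 + d) 0 * 10 + (x + c) := by ring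
    rw [e1, e2]
    rw [show ∀ m, lowD (u.length + 1) m
        = PySem.Int.mod m 10 :: lowD u.length (PySem.Int.floordiv m 10) from fun _ => rfl]
    rw [show ∀ m, lowD (u.length + 1) m
        = PySem.Int.mod m 10 :: lowD u.length (PySem.Int.floordiv m 10) from fun _ => rfl]
    rw [fdiv_mul_add, fdiv_mul_add, mod_mul_add, mod_mul_add]
    rw [ih a (PySem.Int.floordiv (x + c) 10)]

theorem nv_map_mul : ∀ (l : List Int) (a digit : Int),
    (l.map (fun x => x * digit)).foldl (fun a d => a * 10 + d) (a * digit)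
      = l.foldl (fun a d => a * 10 + d) a * digit := by
  intro l
  induction l with
  | nil => intro a digit; simp
  | cons x l ih =>
    intro a digit
    simp only [List.map_cons, List.foldl_cons]
    have e : a * digit * 10 + x * digit = (a * 10 + x) * digit := by ring
    rw [e]
    exact ih (a * 10 + x) digit

theorem range'_map_sub : ∀ (k n : Nat), k ≤ n →
    (List.range' 1 k).map (fun i => n + 1 - i) = (List.range' (n + 1 - k) k).reverse := by
  intro k
  induction k with
  | zero => intro n _; simp
  | succ k ih =>
    intro n hk
    rw [List.range'_1_concat, List.map_append, ih n (by omega)]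
    have e1 : n + 1 - (k + 1) = n - k := by omega
    have e2 : n + 1 - k = n - k + 1 := by omega
    rw [e1, e2, List.range'_succ, List.reverse_cons]
    simp [show n + 1 - (1 + k) = n - k from by omega]

-- ===== VERDICT (by name: the statement is the Claim_ definition above) =====
theorem short_mul_spec : Claim_equal_short_mul := by
  unfold Claim_equal_short_mul Spec_short_mul
  intro val digit _ hpre
  obtain ⟨hne, hm⟩ := hpre
  obtain ⟨v0, t, rfl⟩ : ∃ v0 t, val = v0 :: t := by
    cases val with
    | nil => exact absurd rfl hne
    | cons v0 t => exact ⟨v0, t, rfl⟩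
  have h1 : (v0 :: t).foldl (fun a d => a * 10 + d) 0 = t.foldl (fun a d => a * 10 + d) v0 := by
    simp
  have hM0 : 0 ≤ t.foldl (fun a d => a * 10 + d) v0 * digit := by rw [← h1]; exact hm
  have hM : (t.map (fun x => x * digit)).foldl (fun a d => a * 10 + d) (v0 * digit)
      = t.foldl (fun a d => a * 10 + d) v0 * digit := nv_map_mul t v0 digit
  -- A side
  simp only [short_mul, short_mul_alt, List.length_cons, Nat.add_sub_cancel, List.map_cons]
  rw [← List.foldl_map (f := fun i => t.length + 1 - i) (g := stepA) (l := List.range' 1 t.length)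
      (init := v0 * digit :: t.map (fun x => x * digit))]
  rw [range'_map_sub t.length t.length (le_refl _),
      show t.length + 1 - t.length = 1 from by omega]
  rw [loopA_char t.length (v0 * digit) (t.map (fun x => x * digit)) (by simp)]
  rw [carryPropC_spec]
  simp only [List.length_map, add_zero]
  have hG := hdiv10_foldl (t.map (fun x => x * digit)) (v0 * digit) 0
  simp only [List.length_map, add_zero, hM] at hG
  rw [← hG]
  have hL := lowD_foldl (t.map (fun x => x * digit)) (v0 * digit) 0
  simp only [List.length_map, add_zero, hM] at hL
  rw [← hL]
  have hW0 : 0 ≤ hdiv10 t.length (t.foldl (fun a d => a * 10 + d) v0 * digit) :=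
    hdiv10_nonneg _ _ hM0
  simp only [List.getD_cons_zero]
  rw [frontLoop_char _ _ _ hW0 (by omega)]
  -- B side
  rw [h1, tailLoop_char t.length (t.foldl (fun a d => a * 10 + d) v0 * digit) []]
  simp only [List.nil_append]
  have hW2 : 0 ≤ PySem.Int.floordiv (hdiv10 t.length (t.foldl (fun a d => a * 10 + d) v0 * digit)) 10 :=
    fdiv_nonneg10 _ hW0
  rw [digitsLoop_char _ _ _ hW2 (by omega)]
  rw [mod_toNat _ hW0, fdiv_toNat _ hW0]
  rfl
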